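-- pv_equiv track=rewrite | github.com/elimelt/advent-of-code-2024 | src/day09/sol.py | find_free_spaces
-- ===== SOURCE A (Python) =====
-- from typing import List, Tuple
--
-- def find_free_spaces(blocks: List[str]) -> List[Tuple[int, int]]:
--     spaces = []
--     start = None
--
--     for i, block in enumerate(blocks):
--         if block == ".":
--             if start is None:
--                 start = i
--         elif start is not None:
--             spaces.append((start, i - 1))
--             start = None
--
--     if start is not None:
--         spaces.append((start, len(blocks) - 1))
--
--     return spaces
-- ===== SOURCE B (Python) =====
-- from typing import List, Tuple
--
-- def find_free_spaces(blocks: List[str]) -> List[Tuple[int, int]]: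
--     prevs = [None] + blocks[:-1]
--     nexts = blocks[1:] + [None]
--     starts = [i for i, (b, p) in enumerate(zip(blocks, prevs)) if b == "." and p != "."]
--     ends = [i for i, (b, n) in enumerate(zip(blocks, nexts)) if b == "." and n != "."]
--     return list(zip(starts, ends))
-- ===== Notes on version B (the rewrite author's own statement) =====
-- stated objective: alternative
-- what changed: Replaced A's single-pass open/close state machine (start sentinel plus after-loop flush) by independent boundary detection: run starts and run ends are computed as two separate comprehensions comparing each block against its shifted neighbour lists ([None]+blocks[:-1] and blocks[1:]+[None]), then zipped into intervals.
import Mathlib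
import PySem

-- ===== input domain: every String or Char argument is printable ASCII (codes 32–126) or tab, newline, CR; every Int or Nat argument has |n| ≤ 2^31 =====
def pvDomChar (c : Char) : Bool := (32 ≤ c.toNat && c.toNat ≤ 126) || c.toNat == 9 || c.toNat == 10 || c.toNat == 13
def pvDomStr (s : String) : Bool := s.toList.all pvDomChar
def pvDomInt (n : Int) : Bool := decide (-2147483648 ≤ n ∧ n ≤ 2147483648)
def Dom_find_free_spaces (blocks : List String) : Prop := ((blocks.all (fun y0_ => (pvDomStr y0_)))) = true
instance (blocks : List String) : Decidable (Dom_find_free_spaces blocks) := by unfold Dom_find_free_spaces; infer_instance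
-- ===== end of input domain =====

-- B replaces A's open/close start-sentinel state machine by boundary detection: run starts and run ends are found independently by comparing each block with its shifted neighbour, then zipped (alternative decomposition, same cost).


-- ===== PORT A =====
-- loop body of A's for-loop (state = (spaces, start))
def pvStepA (st : List (Int × Int) × Option Int) (p : Int × String) :
    List (Int × Int) × Option Int :=
  if p.2 == "." then
    match st.2 with
    | none => (st.1, some p.1)
    | some _ => st
  else
    match st.2 with
    | some s => (st.1 ++ [(s, p.1 - 1)], none)
    | none => st

def find_free_spaces (blocks : List String) : List (Int × Int) :=
  let r := (PySem.List.enumerate blocks).foldl pvStepA ([], none)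
  match r.2 with
  | some s => r.1 ++ [(s, (blocks.length : Int) - 1)]
  | none => r.1

-- ===== PORT B =====
-- B's boundary predicate: a block is kept when it is "." and its neighbour (prev for starts, next for ends; None at the edge) is not "."
def pvKeepB (p : Int × (String × Option String)) : Option Int :=
  if p.2.1 == "." && p.2.2 != some "." then some p.1 else none

-- [None] + blocks[:-1] (blocks[:-1] = dropLast, exact) and blocks[1:] + [None] (blocks[1:] = drop 1, exact)
def find_free_spaces_alt (blocks : List String) : List (Int × Int) :=
  let prevs : List (Option String) := none :: blocks.dropLast.map some
  let nexts : List (Option String) := (blocks.drop 1).map some ++ [none]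
  let starts := (PySem.List.enumerate (blocks.zip prevs)).filterMap pvKeepB
  let ends := (PySem.List.enumerate (blocks.zip nexts)).filterMap pvKeepB
  starts.zip ends

-- ===== PRECONDITION & SPEC =====
def Spec_find_free_spaces (blocks : List String) (out : List (Int × Int)) : Prop := out = find_free_spaces_alt blocks
instance (blocks : List String) (out : List (Int × Int)) : Decidable (Spec_find_free_spaces blocks out) := by unfold Spec_find_free_spaces; infer_instance

-- ===== CLAIM (what is proved, stated in full; the proofs are below) =====
def Claim_equal_find_free_spaces : Prop := ∀ (blocks : List String), Dom_find_free_spaces blocks → Spec_find_free_spaces blocks (find_free_spaces blocks)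

-- ===== LEMMAS AND PROOFS =====

-- canonical run-start indices of the segment, d = "previous block was a dot"
def pvS (d : Bool) : List String → Int → List Int
  | [], _ => []
  | b :: rest, s => (if b == "." && !d then [s] else []) ++ pvS (b == ".") rest (s + 1)

-- canonical run-end indices, d = "previous block was a dot" (a pending run ends at s-1)
def pvE (d : Bool) : List String → Int → List Int
  | [], s => if d then [s - 1] else []
  | b :: rest, s => (if d && !(b == ".") then [s - 1] else []) ++ pvE (b == ".") rest (s + 1)

-- A's after-loop flush, with n = index one past the scanned segment
def pvFinishA (n : Int) (r : List (Int × Int) × Option Int) : List (Int × Int) :=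
  match r.2 with
  | some s => r.1 ++ [(s, n - 1)]
  | none => r.1

lemma pvA_main (bs : List String) : ∀ (s : Int) (acc : List (Int × Int)),
    (pvFinishA (s + bs.length) ((PySem.List.enumerate bs s).foldl pvStepA (acc, none))
      = acc ++ List.zip (pvS false bs s) (pvE false bs s))
    ∧ (∀ st, pvFinishA (s + bs.length) ((PySem.List.enumerate bs s).foldl pvStepA (acc, some st))
      = acc ++ List.zip (st :: pvS true bs s) (pvE true bs s)) := by
  induction bs with
  | nil =>
    intro s acc
    constructor
    · simp [PySem.List.enumerate_nil, pvFinishA, pvS, pvE]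
    · intro st; simp [PySem.List.enumerate_nil, pvFinishA, pvS, pvE]
  | cons b bs ih =>
    intro s acc
    have hlen : s + ((b :: bs).length : Int) = (s + 1) + (bs.length : Int) := by
      simp; ring
    by_cases hb : b = "."
    · subst hb
      constructor
      · simp only [PySem.List.enumerate_cons, List.foldl_cons, pvStepA, beq_self_eq_true,
          reduceIte, hlen]
        have := (ih (s + 1) acc).2 s
        simpa [pvS, pvE] using this
      · intro st
        simp only [PySem.List.enumerate_cons, List.foldl_cons, pvStepA, beq_self_eq_true,
          reduceIte, hlen]
        have := (ih (s + 1) acc).2 st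
        simpa [pvS, pvE] using this
    · have hbe : (b == ".") = false := by simp [hb]
      constructor
      · simp only [PySem.List.enumerate_cons, List.foldl_cons, pvStepA, hbe, hlen]
        have := (ih (s + 1) acc).1
        simpa [pvS, pvE, hbe] using this
      · intro st
        simp only [PySem.List.enumerate_cons, List.foldl_cons, pvStepA, hbe, hlen]
        have := (ih (s + 1) (acc ++ [(st, s - 1)])).1
        simp [pvS, pvE, hbe, List.zip_cons_cons] at this ⊢
        rw [this]
    
-- the starts comprehension, generalized over the previous block and the offset
lemma pvB_starts (bs : List String) : ∀ (prev : Option String) (s : Int),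
    (PySem.List.enumerate (bs.zip (prev :: bs.dropLast.map some)) s).filterMap pvKeepB
      = pvS (prev == some ".") bs s := by
  induction bs with
  | nil => intro prev s; simp [PySem.List.enumerate_nil, pvS]
  | cons b rest ih =>
    intro prev s
    have hz : (b :: rest).zip (prev :: (b :: rest).dropLast.map some)
        = (b, prev) :: rest.zip (some b :: rest.dropLast.map some) := by
      cases rest <;> simp
    rw [hz, PySem.List.enumerate_cons, List.filterMap_cons, ih (some b) (s + 1)]
    by_cases hb : b = "." <;> by_cases hp : prev = some "." <;>
      simp [pvKeepB, pvS, hb, hp]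

def pvEFM : List String → Int → List Int
  | [], _ => []
  | b :: rest, s => (if b == "." && !(rest.head? == some ".") then [s] else []) ++ pvEFM rest (s + 1)

-- the ends comprehension equals the one-step-lookahead recursion
lemma pvB_ends (bs : List String) : ∀ (s : Int),
    (PySem.List.enumerate (bs.zip ((bs.drop 1).map some ++ [none])) s).filterMap pvKeepB
      = pvEFM bs s := by
  induction bs with
  | nil => intro s; simp [PySem.List.enumerate_nil, pvEFM]
  | cons b rest ih =>
    intro s
    cases rest with
    | nil =>
      by_cases hb : b = "." <;>
        simp [PySem.List.enumerate_cons, PySem.List.enumerate_nil, pvKeepB, pvEFM, hb]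
    | cons c rs =>
      have hz : (b :: c :: rs).zip (((b :: c :: rs).drop 1).map some ++ [none])
          = (b, some c) :: (c :: rs).zip (((c :: rs).drop 1).map some ++ [none]) := by simp
      rw [hz, PySem.List.enumerate_cons, List.filterMap_cons, ih (s + 1)]
      by_cases hb : b = "." <;> by_cases hc : c = "." <;>
        simp [pvKeepB, pvEFM, hb, hc]

-- the lookahead recursion pvEFM is pvE with no pending run
lemma pvE_eq_pvEFM (bs : List String) : ∀ (d : Bool) (s : Int),
    pvE d bs s = (if d && !(bs.head? == some ".") then [s - 1] else []) ++ pvEFM bs s := by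
  induction bs with
  | nil => intro d s; cases d <;> simp [pvE, pvEFM]
  | cons b rest ih =>
    intro d s
    simp only [pvE, pvEFM, ih (b == ".") (s + 1)]
    by_cases hb : b = "." <;> cases d <;>
      simp [hb, add_sub_cancel_right]

-- ===== VERDICT (by name: the statement is the Claim_ definition above) =====
theorem find_free_spaces_spec : Claim_equal_find_free_spaces := by
  intro blocks _
  unfold Spec_find_free_spaces find_free_spaces find_free_spaces_alt
  have hA := (pvA_main blocks 0 []).1
  simp only [zero_add] at hA
  have hS := pvB_starts blocks none 0
  have hE := pvB_ends blocks 0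
  have hEE := pvE_eq_pvEFM blocks false 0
  simp at hEE hS hE
  show pvFinishA (blocks.length : Int) ((PySem.List.enumerate blocks 0).foldl pvStepA ([], none)) = _
  rw [hA]
  simp [hS, hE, hEE]
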